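-- pv_equiv track=rewrite | github.com/nikita-kostylev/federated-est-miner | pm4py/algo/discovery/est_miner/utils/est_utils.py | eventually_follows
-- ===== SOURCE A (Python) =====
-- def eventually_follows(a1, a2, trace_bit_map):
--     # returns true if a2 eventually follows a1 in the trace
--     found_a1 = False
--     follows  = False
--     for e in trace_bit_map:
--         if found_a1:
--             if e == a2:
--                 follows = True
--         if e == a1:
--             found_a1 = True
--     return follows
-- ===== SOURCE B (Python) =====
-- def eventually_follows(a1, a2, trace_bit_map):
--     # returns true if a2 eventually follows a1 in the trace
--     lst = list(trace_bit_map)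
--     if a1 not in lst:
--         return False
--     idx = lst.index(a1)
--     return a2 in lst[idx + 1:]
-- ===== Notes on version B (the rewrite author's own statement) =====
-- stated objective: simpler
-- what changed: Replaces the fused single-pass boolean-tracking scan with a two-phase structure: find the first occurrence of a1, then test membership of a2 in the suffix strictly after it.
import Mathlib
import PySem

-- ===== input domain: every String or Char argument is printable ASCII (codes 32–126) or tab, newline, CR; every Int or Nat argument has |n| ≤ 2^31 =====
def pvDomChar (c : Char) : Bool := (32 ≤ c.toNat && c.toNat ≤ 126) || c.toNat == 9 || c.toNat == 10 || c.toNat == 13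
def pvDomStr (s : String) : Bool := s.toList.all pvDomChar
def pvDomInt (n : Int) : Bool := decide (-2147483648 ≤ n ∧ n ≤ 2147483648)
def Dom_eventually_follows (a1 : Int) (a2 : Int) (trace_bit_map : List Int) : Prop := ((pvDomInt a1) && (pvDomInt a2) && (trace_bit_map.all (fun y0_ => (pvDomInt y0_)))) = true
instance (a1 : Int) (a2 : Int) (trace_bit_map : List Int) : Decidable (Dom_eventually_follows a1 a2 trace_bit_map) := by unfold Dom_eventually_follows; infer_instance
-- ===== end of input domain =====

-- B replaces A's fused boolean-tracking scan with a two-phase find-first-a1 / search-the-suffix structure (same behaviour, plainer decomposition).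


-- ===== PORT A =====
-- state = (found_a1, follows); the loop body updates them in A's order
def efStep (a1 a2 : Int) (st : Bool × Bool) (e : Int) : Bool × Bool :=
  let follows := if st.1 then (if e == a2 then true else st.2) else st.2
  let found := if e == a1 then true else st.1
  (found, follows)

def eventually_follows (a1 : Int) (a2 : Int) (trace_bit_map : List Int) : Bool :=
  (trace_bit_map.foldl (efStep a1 a2) (false, false)).2

-- ===== PORT B =====
def eventually_follows_alt (a1 : Int) (a2 : Int) (trace_bit_map : List Int) : Bool :=
  if trace_bit_map.contains a1 then
    match PySem.List.index? trace_bit_map a1 with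
    | some idx => (PySem.List.slice trace_bit_map (some ((idx : Int) + 1)) none).contains a2
    | none => false          -- unreachable: guarded by the membership test
  else false

-- ===== PRECONDITION & SPEC =====
def Spec_eventually_follows (a1 : Int) (a2 : Int) (trace_bit_map : List Int) (out : Bool) : Prop := out = eventually_follows_alt a1 a2 trace_bit_map
instance (a1 : Int) (a2 : Int) (trace_bit_map : List Int) (out : Bool) : Decidable (Spec_eventually_follows a1 a2 trace_bit_map out) := by unfold Spec_eventually_follows; infer_instance

-- ===== CLAIM (what is proved, stated in full; the proofs are below) =====
def Claim_equal_eventually_follows : Prop := ∀ (a1 : Int) (a2 : Int) (trace_bit_map : List Int), Dom_eventually_follows a1 a2 trace_bit_map → Spec_eventually_follows a1 a2 trace_bit_map (eventually_follows a1 a2 trace_bit_map)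

-- ===== LEMMAS AND PROOFS =====

theorem efStep_eq (a1 a2 : Int) (st : Bool × Bool) (e : Int) :
    efStep a1 a2 st e = ((e == a1 || st.1), (st.2 || (st.1 && e == a2))) := by
  obtain ⟨f, fo⟩ := st
  cases f <;> cases fo <;> cases h1 : (e == a1) <;> cases h2 : (e == a2) <;>
    simp [efStep, h1, h2]

-- A's loop, characterised: the pending state contributes (found && a2-in-rest), the rest runs fresh.
theorem efFold_snd (a1 a2 : Int) (l : List Int) : ∀ found follows : Bool,
    (l.foldl (efStep a1 a2) (found, follows)).2
      = (follows || (found && l.contains a2) || eventually_follows a1 a2 l) := by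
  induction l with
  | nil => intro found follows; simp [eventually_follows]
  | cons e l ih =>
    intro found follows
    show (l.foldl (efStep a1 a2) (efStep a1 a2 (found, follows) e)).2 = _
    have hE : eventually_follows a1 a2 (e :: l)
        = ((e == a1) && l.contains a2 || eventually_follows a1 a2 l) := by
      show (l.foldl (efStep a1 a2) (efStep a1 a2 (false, false) e)).2 = _
      rw [efStep_eq, ih]; simp
    rw [hE, efStep_eq, ih]
    rw [List.contains_cons, (Bool.beq_comm (a := a2) (b := e))]
    generalize (e == a1) = p
    generalize (e == a2) = q
    generalize l.contains a2 = r
    generalize eventually_follows a1 a2 l = s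
    revert p q r s found follows
    decide

theorem A_cons (a1 a2 e : Int) (l : List Int) :
    eventually_follows a1 a2 (e :: l)
      = ((e == a1) && l.contains a2 || eventually_follows a1 a2 l) := by
  show (l.foldl (efStep a1 a2) (efStep a1 a2 (false, false) e)).2 = _
  rw [efStep_eq, efFold_snd]; simp

-- if A found the pattern, a2 certainly occurs in the trace
theorem A_contains (a1 a2 : Int) (l : List Int)
    (h : eventually_follows a1 a2 l = true) : l.contains a2 = true := by
  induction l with
  | nil => simp [eventually_follows] at h
  | cons e l ih =>
    rw [A_cons] at h
    simp at h ⊢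
    rcases h with h | h
    · exact Or.inr h.2
    · have := ih h; simp at this; exact Or.inr this

-- B with the anchor in front: search the tail
theorem alt_cons_self (a1 a2 : Int) (l : List Int) :
    eventually_follows_alt a1 a2 (a1 :: l) = l.contains a2 := by
  unfold eventually_follows_alt
  rw [PySem.List.index?_cons_self]
  simp [PySem.List.slice_from_one]

-- B skips a leading element that is not the anchor
theorem alt_cons_ne (a1 a2 e : Int) (l : List Int) (he : e ≠ a1) :
    eventually_follows_alt a1 a2 (e :: l) = eventually_follows_alt a1 a2 l := by
  unfold eventually_follows_alt
  rw [PySem.List.index?_cons_of_ne l he]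
  by_cases hm : a1 ∈ l
  · rcases Option.isSome_iff_exists.mp ((PySem.List.index?_isSome_iff l a1).mpr hm) with ⟨n, hn⟩
    rw [hn]
    simp only [Option.map_some]
    rw [show ((e :: l).contains a1) = (l.contains a1) by simp [Ne.symm he]]
    rw [show (((n + 1 : Nat) : Int) + 1) = (((n + 2 : Nat)) : Int) by push_cast; ring,
        show ((n : Int) + 1) = (((n + 1 : Nat)) : Int) by push_cast; ring,
        PySem.List.slice_from_natCast, PySem.List.slice_from_natCast]
    simp
  · rw [(PySem.List.index?_eq_none_iff l a1).mpr hm]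
    simp [hm, Ne.symm he]

theorem main_eq (a1 a2 : Int) (l : List Int) :
    eventually_follows_alt a1 a2 l = eventually_follows a1 a2 l := by
  induction l with
  | nil => simp [eventually_follows, eventually_follows_alt]
  | cons e l ih =>
    rw [A_cons]
    by_cases he : e = a1
    · subst he
      rw [alt_cons_self]
      simp only [beq_self_eq_true, Bool.true_and]
      by_cases hA : eventually_follows e a2 l = true
      · have hc := A_contains e a2 l hA
        simp at hc
        simp [hA, hc]
      · simp [Bool.eq_false_iff.mpr hA]
    · rw [alt_cons_ne a1 a2 e l he, ih]
      simp [he]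

-- ===== VERDICT (by name: the statement is the Claim_ definition above) =====
theorem eventually_follows_spec : Claim_equal_eventually_follows := by
  intro a1 a2 l _
  unfold Spec_eventually_follows
  exact (main_eq a1 a2 l).symm
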